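-- pv_equiv track=rewrite | github.com/mombasawalafaizan/dsa_solution | Searching and Sorting/kth_smallest_number_for_ranges.py | find_smallest_gte_el
-- ===== SOURCE A (Python) =====
-- def find_smallest_gte_el(arr, n, x):
--     '''Finds the smallest greater than or equal to element for x'''
--     l = 0
--     h = n-1
--     while l <= h:
--         mid = (l+h)//2
--         if x > arr[mid][2]:
--             l = mid + 1
--         else:
--             if mid==0 or arr[mid][2]==x or \
--                 x > arr[mid-1][2] :
--                 return mid
--             h = mid
--     return -1
-- ===== SOURCE B (Python) =====
-- def find_smallest_gte_el(arr, n, x):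
--     '''Finds the smallest greater than or equal to element for x'''
--     def search(lo, hi):
--         # returns the found index, or None when the interval is empty
--         if hi < lo:
--             return None
--         mid = (lo + hi) // 2
--         v = arr[mid][2]
--         if v < x:
--             return search(mid + 1, hi)
--         if mid == 0 or v == x or arr[mid - 1][2] < x:
--             return mid
--         return search(lo, mid)
--     r = search(0, n - 1)
--     return -1 if r is None else r
-- ===== Notes on version B (the rewrite author's own statement) =====
-- stated objective: alternative
-- what changed: A's iterative while-loop mutating absolute bounds is re-decomposed as a recursive Option-returning search (None = not found, mapped to -1 by the wrapper), with each element fetched once into a local and the comparisons written from the element's side; the probe sequence is identical, so the return value is the same.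
-- outside the precondition, e.g. on find_smallest_gte_el([(0, 0, 5), (0, 0, 6)], 3, 5): A returns 0, B returns 0
import Mathlib
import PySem

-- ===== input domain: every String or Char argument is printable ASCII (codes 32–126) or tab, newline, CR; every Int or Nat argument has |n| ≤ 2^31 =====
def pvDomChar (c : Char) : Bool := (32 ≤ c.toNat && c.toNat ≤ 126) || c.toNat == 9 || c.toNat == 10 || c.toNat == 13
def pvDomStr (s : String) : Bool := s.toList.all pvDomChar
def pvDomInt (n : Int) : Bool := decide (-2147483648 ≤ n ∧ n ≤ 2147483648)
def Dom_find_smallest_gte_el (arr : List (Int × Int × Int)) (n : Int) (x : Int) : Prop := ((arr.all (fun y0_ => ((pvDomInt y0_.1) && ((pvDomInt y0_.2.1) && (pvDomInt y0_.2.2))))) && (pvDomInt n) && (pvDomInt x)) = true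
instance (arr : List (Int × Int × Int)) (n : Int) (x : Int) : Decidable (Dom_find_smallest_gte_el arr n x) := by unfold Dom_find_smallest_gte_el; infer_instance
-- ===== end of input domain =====

-- B re-decomposes A's iterative l/h while-loop as an Option-returning recursive search (objective: alternative); same return value.

-- ===== PORT A =====
-- third component of arr[i] (arr[i][2]); in range under Pre_ (default never observed there)
def pvThird (arr : List (Int × Int × Int)) (i : Int) : Int :=
  ((PySem.List.pyGet? arr i).getD (0, 0, 0)).2.2

-- A's while-loop over absolute bounds l, h.  'fuel' is only the totality device:
-- every recursing step shrinks the interval h+1-l by at least 1 (except the state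
-- l = h = mid without a return, where Python loops forever), so the wrapper's
-- fuel n+1 is never exhausted where the Python loop terminates.
def find_smallest_gte_el_loop (arr : List (Int × Int × Int)) (x : Int) :
    Nat → Int → Int → Int
  | 0, _, _ => -1
  | fuel + 1, l, h =>
    if l ≤ h then
      let mid := PySem.Int.floordiv (l + h) 2
      if x > pvThird arr mid then
        find_smallest_gte_el_loop arr x fuel (mid + 1) h
      else if mid = 0 ∨ pvThird arr mid = x ∨ x > pvThird arr (mid - 1) then
        mid
      else
        find_smallest_gte_el_loop arr x fuel l mid
    else -1

def find_smallest_gte_el (arr : List (Int × Int × Int)) (n : Int) (x : Int) : Int :=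
  find_smallest_gte_el_loop arr x (n.toNat + 1) 0 (n - 1)

-- ===== PORT B =====
-- B's recursive search; 'none' means the interval is empty / not found.  Element
-- access arr[i][2] is ported as getD i.toNat: exact here because every index Source B
-- probes is nonnegative (mid ≥ lo ≥ 0 on every reachable call, and arr[mid-1] is
-- read only when mid ≠ 0 thanks to Python's short-circuit 'or').  'fuel' is again
-- only the totality device, with the same bound as A's.
def fsg_search (arr : List (Int × Int × Int)) (x : Int) :
    Nat → Int → Int → Option Int
  | 0, _, _ => none
  | fuel + 1, lo, hi =>
    if hi < lo then none
    else
      let mid := PySem.Int.floordiv (lo + hi) 2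
      let v := (arr.getD mid.toNat (0, 0, 0)).2.2
      if v < x then
        fsg_search arr x fuel (mid + 1) hi
      else if mid = 0 ∨ v = x ∨ (arr.getD (mid - 1).toNat (0, 0, 0)).2.2 < x then
        some mid
      else
        fsg_search arr x fuel lo mid

def find_smallest_gte_el_alt (arr : List (Int × Int × Int)) (n : Int) (x : Int) : Int :=
  match fsg_search arr x (n.toNat + 1) 0 (n - 1) with
  | none => -1
  | some r => r

-- ===== PRECONDITION & SPEC =====
-- Pre_ excludes n > len(arr), on which A's probes can raise IndexError; A may also
-- return before probing out of range there, and B behaves identically on those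
-- inputs (see cites).
def Pre_find_smallest_gte_el (arr : List (Int × Int × Int)) (n : Int) (x : Int) : Prop :=
  n ≤ arr.length

instance (arr : List (Int × Int × Int)) (n : Int) (x : Int) : Decidable (Pre_find_smallest_gte_el arr n x) := by
  unfold Pre_find_smallest_gte_el; infer_instance

def pvWitness_find_smallest_gte_el : (List (Int × Int × Int)) × Int × Int :=
  ([(1, 2, 3), (4, 5, 7)], 2, 4)

def Spec_find_smallest_gte_el (arr : List (Int × Int × Int)) (n : Int) (x : Int) (out : Int) : Prop := out = find_smallest_gte_el_alt arr n x
instance (arr : List (Int × Int × Int)) (n : Int) (x : Int) (out : Int) : Decidable (Spec_find_smallest_gte_el arr n x out) := by unfold Spec_find_smallest_gte_el; infer_instance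

-- ===== CLAIM (what is proved, stated in full; the proofs are below) =====
def Claim_equal_find_smallest_gte_el : Prop := ∀ (arr : List (Int × Int × Int)) (n : Int) (x : Int), Dom_find_smallest_gte_el arr n x → Pre_find_smallest_gte_el arr n x → Spec_find_smallest_gte_el arr n x (find_smallest_gte_el arr n x)

-- ===== LEMMAS AND PROOFS =====

-- for a nonnegative index the two access styles agree
lemma third_eq_getD (arr : List (Int × Int × Int)) (i : Int) (hi : 0 ≤ i) :
    pvThird arr i = (arr.getD i.toNat (0, 0, 0)).2.2 := by
  simp only [pvThird, PySem.List.pyGet?_of_nonneg arr hi]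
  cases h : arr[i.toNat]? with
  | none => simp [List.getD, h]
  | some a => simp [List.getD, h]

-- with the same fuel the two recursions visit the same states and agree (through
-- the none ↦ -1 wrapper) on every state with 0 ≤ l — the invariant of both programs.
lemma loop_eq_search (arr : List (Int × Int × Int)) (x : Int) :
    ∀ (fuel : Nat) (l h : Int), 0 ≤ l →
      find_smallest_gte_el_loop arr x fuel l h =
        (match fsg_search arr x fuel l h with | none => -1 | some r => r) := by
  intro fuel
  induction fuel with
  | zero => intro l h _; rfl
  | succ fuel ih =>
    intro l h hl
    rw [find_smallest_gte_el_loop, fsg_search]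
    by_cases hlh : l ≤ h
    · have hne : ¬ h < l := by omega
      have hmidb := PySem.Int.floordiv_two_mid_bounds hlh
      set mid := PySem.Int.floordiv (l + h) 2 with hmid
      have hm0 : 0 ≤ mid := by omega
      have hv : pvThird arr mid = (arr.getD mid.toNat (0, 0, 0)).2.2 := third_eq_getD arr mid hm0
      simp only [hlh, hne, if_pos, if_false, hv]
      by_cases hgt : (arr.getD mid.toNat (0, 0, 0)).2.2 < x
      · rw [if_pos hgt, if_pos hgt]
        exact ih (mid + 1) h (by omega)
      · rw [if_neg hgt, if_neg hgt]
        by_cases hm : mid = 0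
        · rw [if_pos (Or.inl hm), if_pos (Or.inl hm)]
        · have hv1 : pvThird arr (mid - 1) = (arr.getD (mid - 1).toNat (0, 0, 0)).2.2 :=
            third_eq_getD arr (mid - 1) (by omega)
          rw [hv1]
          by_cases hret : mid = 0 ∨ (arr.getD mid.toNat (0, 0, 0)).2.2 = x ∨
              (arr.getD (mid - 1).toNat (0, 0, 0)).2.2 < x
          · rw [if_pos hret, if_pos hret]
          · rw [if_neg hret, if_neg hret]
            exact ih l mid hl
    · have hlt : h < l := by omega
      simp [hlh, hlt]

-- ===== VERDICT (by name: the statement is the Claim_ definition above) =====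
theorem find_smallest_gte_el_spec : Claim_equal_find_smallest_gte_el := by
  intro arr n x _ _
  unfold Spec_find_smallest_gte_el find_smallest_gte_el find_smallest_gte_el_alt
  exact loop_eq_search arr x (n.toNat + 1) 0 (n - 1) (le_refl 0)
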